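-- pv_equiv track=rewrite | github.com/samhithch-prog/PyStreamlineAI | src/ui/pages/careers/jobs_tab.py | _industry_query_tokens
-- ===== SOURCE A (Python) =====
-- def _industry_query_tokens(industries: list[str] | tuple[str, ...] | None) -> list[str]:
--     if not isinstance(industries, (list, tuple)):
--         return []
--     token_map: dict[str, list[str]] = {
--         "technology": ["software", "tech"],
--         "finance": ["finance", "banking"],
--         "healthcare": ["healthcare", "medical"],
--         "retail": ["retail", "ecommerce"],
--         "education": ["education"],
--         "manufacturing": ["manufacturing", "industrial"],
--         "consulting": ["consulting", "advisory"],
--     }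
--     selected_tokens: list[str] = []
--     seen: set[str] = set()
--     for industry in industries:
--         key = str(industry or "").strip().lower()
--         if key not in token_map:
--             continue
--         for token in token_map[key]:
--             if token in seen:
--                 continue
--             seen.add(token)
--             selected_tokens.append(token)
--             if len(selected_tokens) >= 3:
--                 return selected_tokens
--     return selected_tokens
-- ===== SOURCE B (Python) =====
-- def _industry_query_tokens(industries):
--     if not isinstance(industries, (list, tuple)):
--         return []
--     token_map = {
--         "technology": ["software", "tech"],
--         "finance": ["finance", "banking"],
--         "healthcare": ["healthcare", "medical"],
--         "retail": ["retail", "ecommerce"],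
--         "education": ["education"],
--         "manufacturing": ["manufacturing", "industrial"],
--         "consulting": ["consulting", "advisory"],
--     }
--     # Every token in the table belongs to exactly one industry key, so
--     # deduplicating the NORMALIZED KEYS (first occurrences) already makes the
--     # token stream duplicate-free: no per-token seen-set is needed at all.
--     out = []
--     for key in dict.fromkeys(str(x or "").strip().lower() for x in industries):
--         out.extend(token_map.get(key, []))
--     return out[:3]
-- ===== Notes on version B (the rewrite author's own statement) =====
-- stated objective: alternative
-- what changed: B drops A's per-token seen-set and early break entirely: it deduplicates the normalized industry KEYS first (dict.fromkeys), which is correct because each token of the fixed table belongs to exactly one key, then expands each distinct key once and caps with [:3].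
import Mathlib
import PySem

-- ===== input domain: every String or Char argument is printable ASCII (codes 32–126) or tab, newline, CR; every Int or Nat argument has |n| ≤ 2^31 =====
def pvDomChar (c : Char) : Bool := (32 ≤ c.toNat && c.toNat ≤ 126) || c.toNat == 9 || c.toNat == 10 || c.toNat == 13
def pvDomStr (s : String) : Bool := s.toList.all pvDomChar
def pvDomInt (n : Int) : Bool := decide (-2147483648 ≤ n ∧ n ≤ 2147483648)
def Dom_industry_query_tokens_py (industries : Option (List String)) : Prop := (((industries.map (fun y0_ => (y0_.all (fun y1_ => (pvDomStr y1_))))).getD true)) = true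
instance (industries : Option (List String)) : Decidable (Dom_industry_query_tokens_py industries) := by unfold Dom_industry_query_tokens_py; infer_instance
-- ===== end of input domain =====

-- B drops A's per-token seen-set and early break: it dedups the normalized industry KEYS
-- (each token of the fixed table belongs to exactly one key), expands each distinct key once,
-- then caps at 3 (objective: alternative).

-- ===== PORT A =====
-- shared literal constant (the token_map dict literal of both Pythons)
def pvTokenMap : PySem.Dict String (List String) := PySem.Dict.mk
  [("technology", ["software", "tech"]),
   ("finance", ["finance", "banking"]),
   ("healthcare", ["healthcare", "medical"]),
   ("retail", ["retail", "ecommerce"]),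
   ("education", ["education"]),
   ("manufacturing", ["manufacturing", "industrial"]),
   ("consulting", ["consulting", "advisory"])]

-- inner 'for token in token_map[key]' loop; Bool = early 'return selected_tokens' taken
def pvInnerA : List String → List String → PySem.Set String → List String × PySem.Set String × Bool
  | [], sel, seen => (sel, seen, false)
  | t :: ts, sel, seen =>
    if PySem.Set.contains seen t then pvInnerA ts sel seen
    else
      let seen' := PySem.Set.add seen t
      let sel' := sel ++ [t]
      if 3 ≤ sel'.length then (sel', seen', true)
      else pvInnerA ts sel' seen'

-- outer 'for industry in industries' loop
def pvLoopA : List String → List String → PySem.Set String → List String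
  | [], sel, _ => sel
  | ind :: rest, sel, seen =>
    let key := PySem.Str.lower (PySem.Str.strip (if ind == "" then "" else ind))
    if !(pvTokenMap.contains key) then pvLoopA rest sel seen
    else
      match pvInnerA (pvTokenMap.getD key []) sel seen with
      | (sel', _, true) => sel'
      | (sel', seen', false) => pvLoopA rest sel' seen'

def industry_query_tokens_py (industries : Option (List String)) : List String :=
  match industries with
  | none => []            -- 'not isinstance(industries, (list, tuple))'
  | some inds => pvLoopA inds [] PySem.Set.empty

-- ===== PORT B =====
def industry_query_tokens_py_alt (industries : Option (List String)) : List String :=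
  match industries with
  | none => []
  | some inds =>
    -- dict.fromkeys over the normalized keys = order-preserving dedup (PySem.List.dedup)
    let keys := inds.map (fun ind => PySem.Str.lower (PySem.Str.strip (if ind == "" then "" else ind)))
    let out := (PySem.List.dedup keys).foldl (fun acc k => acc ++ pvTokenMap.getD k []) []
    out.take 3

-- ===== PRECONDITION & SPEC =====
def Spec_industry_query_tokens_py (industries : Option (List String)) (out : List String) : Prop := out = industry_query_tokens_py_alt industries
instance (industries : Option (List String)) (out : List String) : Decidable (Spec_industry_query_tokens_py industries out) := by unfold Spec_industry_query_tokens_py; infer_instance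

-- ===== CLAIM (what is proved, stated in full; the proofs are below) =====
def Claim_equal_industry_query_tokens_py : Prop := ∀ (industries : Option (List String)), Dom_industry_query_tokens_py industries → Spec_industry_query_tokens_py industries (industry_query_tokens_py industries)

-- ===== LEMMAS AND PROOFS =====

-- the tokens of l that are not in seen, first occurrences only, in order
def pvFresh (seen : List String) : List String → List String
  | [] => []
  | t :: ts => if t ∈ seen then pvFresh seen ts else t :: pvFresh (seen ++ [t]) ts

-- g: the tokens of one normalized key
def pvG (k : String) : List String := pvTokenMap.getD k []

theorem pvFoldl_add_eq_fresh (l seen : List String) :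
    l.foldl PySem.Set.add seen = seen ++ pvFresh seen l := by
  induction l generalizing seen with
  | nil => simp [pvFresh]
  | cons t ts ih =>
    by_cases h : t ∈ seen
    · simp [pvFresh, h, List.foldl_cons, ih]
    · simp [pvFresh, h, List.foldl_cons, ih (seen ++ [t])]

theorem pvFresh_append (seen xs ys : List String) :
    pvFresh seen (xs ++ ys) = pvFresh seen xs ++ pvFresh (seen ++ pvFresh seen xs) ys := by
  induction xs generalizing seen with
  | nil => simp [pvFresh]
  | cons t ts ih =>
    by_cases h : t ∈ seen
    · simp [pvFresh, h, ih]
    · simp [pvFresh, h, ih (seen ++ [t]), List.append_assoc]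

theorem pvInnerA_spec (toks sel : List String) (h : sel.length < 3) :
    pvInnerA toks sel sel =
      (sel ++ (pvFresh sel toks).take (3 - sel.length),
       sel ++ (pvFresh sel toks).take (3 - sel.length),
       decide (3 ≤ sel.length + (pvFresh sel toks).length)) := by
  induction toks generalizing sel with
  | nil => simp [pvInnerA, pvFresh]; omega
  | cons t ts ih =>
    by_cases hm : t ∈ sel
    · have hct : PySem.Set.contains sel t = true := (PySem.Set.contains_iff sel t).mpr hm
      simp [pvInnerA, pvFresh, hm, ih sel h]
    · have hc : PySem.Set.contains sel t = false := by
        rcases Bool.eq_false_or_eq_true (PySem.Set.contains sel t) with h' | h'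
        · exact absurd ((PySem.Set.contains_iff sel t).mp h') hm
        · exact h'
      have hadd : PySem.Set.add sel t = sel ++ [t] := PySem.Set.add_of_not_mem hm
      by_cases h3 : 3 ≤ (sel ++ [t]).length
      · have hlen : sel.length = 2 := by simp at h3; omega
        simp [pvInnerA, pvFresh, hm, hlen]
        omega
      · have h' : (sel ++ [t]).length < 3 := by omega
        have hlt : sel.length < 2 := by simp at h3; omega
        have := ih (sel ++ [t]) h'
        simp [pvInnerA, pvFresh, hm, this]
        have hk : 3 - sel.length = (2 - sel.length) + 1 := by omega
        rw [hk, List.take_succ_cons, if_neg (by omega : ¬ 2 ≤ sel.length)]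
        simp only [Prod.mk.injEq, decide_eq_decide]
        exact ⟨trivial, trivial, by omega⟩

def pvFlat (inds : List String) : List String :=
  inds.flatMap (fun ind =>
    pvTokenMap.getD (PySem.Str.lower (PySem.Str.strip (if ind == "" then "" else ind))) [])

set_option maxHeartbeats 1000000 in
theorem pvLoopA_spec (inds sel : List String) (h : sel.length < 3) :
    pvLoopA inds sel sel = sel ++ (pvFresh sel (pvFlat inds)).take (3 - sel.length) := by
  induction inds generalizing sel with
  | nil => simp [pvLoopA, pvFlat, pvFresh]
  | cons ind rest ih =>
    simp only [pvLoopA]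
    set key := PySem.Str.lower (PySem.Str.strip (if ind == "" then "" else ind)) with hkey
    have hflat : pvFlat (ind :: rest) = pvTokenMap.getD key [] ++ pvFlat rest := by
      simp only [pvFlat, List.flatMap_cons, hkey]
    rw [hflat]
    by_cases hc : pvTokenMap.contains key = true
    · rw [hc]
      simp only [Bool.not_true, Bool.false_eq_true, if_false]
      rw [pvInnerA_spec (pvTokenMap.getD key []) sel h]
      set f1 := pvFresh sel (pvTokenMap.getD key []) with hf1
      rw [pvFresh_append, ← hf1]
      by_cases hflag : 3 ≤ sel.length + f1.length
      · rw [decide_eq_true hflag]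
        rw [List.take_append_of_le_length (by omega : 3 - sel.length ≤ f1.length)]
      · rw [decide_eq_false (by exact fun hh => hflag hh)]
        show pvLoopA rest (sel ++ f1.take (3 - sel.length)) (sel ++ f1.take (3 - sel.length)) =
          sel ++ List.take (3 - sel.length) (f1 ++ pvFresh (sel ++ f1) (pvFlat rest))
        have hr : (sel ++ f1.take (3 - sel.length)).length < 3 := by
          simp; omega
        have hfull : f1.take (3 - sel.length) = f1 := List.take_of_length_le (by omega)
        have hlen2 : 3 - (sel ++ f1).length = 3 - sel.length - f1.length := by
          simp only [List.length_append]; omega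
        rw [hfull] at hr ⊢
        rw [ih _ hr, hlen2, List.take_append,
            List.take_of_length_le (by omega : f1.length ≤ 3 - sel.length), List.append_assoc]
    · have hc' : pvTokenMap.contains key = false := by
        rcases Bool.eq_false_or_eq_true (pvTokenMap.contains key) with h' | h'
        · exact absurd h' hc
        · exact h'
      have hd : pvTokenMap.getD key [] = [] := PySem.Dict.getD_of_not_contains pvTokenMap [] hc'
      rw [hc', hd]
      simp only [Bool.not_false, if_true, List.nil_append]
      exact ih sel h

-- closed form of pvG: the literal if-chain of the fixed table
theorem pvG_eq (k : String) :
    pvG k =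
      if k = "technology" then ["software", "tech"]
      else if k = "finance" then ["finance", "banking"]
      else if k = "healthcare" then ["healthcare", "medical"]
      else if k = "retail" then ["retail", "ecommerce"]
      else if k = "education" then ["education"]
      else if k = "manufacturing" then ["manufacturing", "industrial"]
      else if k = "consulting" then ["consulting", "advisory"]
      else [] := by
  unfold pvG
  split_ifs with h1 h2 h3 h4 h5 h6 h7
  · subst h1; decide
  · subst h2; decide
  · subst h3; decide
  · subst h4; decide
  · subst h5; decide
  · subst h6; decide
  · subst h7; decide
  · simp [pvTokenMap, PySem.Dict.getD, PySem.Dict.get?, Ne.symm h1, Ne.symm h2, Ne.symm h3,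
      Ne.symm h4, Ne.symm h5, Ne.symm h6, Ne.symm h7]

-- tokens of distinct keys never collide (checked on the literal table)
set_option maxHeartbeats 2000000 in
theorem pvG_disj (k1 k2 : String) (hne : k1 ≠ k2) (t : String) (h1 : t ∈ pvG k1) :
    t ∉ pvG k2 := by
  rw [pvG_eq] at h1 ⊢
  split_ifs at h1 ⊢ <;>
    first
      | exact List.not_mem_nil
      | exact absurd h1 List.not_mem_nil
      | (subst_vars; exact absurd rfl hne)
      | (subst_vars
         simp only [List.mem_cons, List.not_mem_nil, or_false] at h1
         rcases h1 with rfl | rfl <;> decide)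

theorem pvG_nodup (k : String) : (pvG k).Nodup := by
  rw [pvG_eq]; split_ifs <;> decide

theorem pvFresh_skip (seen l rest : List String) (h : ∀ t ∈ l, t ∈ seen) :
    pvFresh seen (l ++ rest) = pvFresh seen rest := by
  induction l with
  | nil => rfl
  | cons t ts ih =>
    simp only [List.cons_append, pvFresh, if_pos (h t (List.mem_cons_self))]
    exact ih (fun x hx => h x (List.mem_cons_of_mem _ hx))

theorem pvFresh_of_new (seen l : List String) (hnd : l.Nodup) (h : ∀ t ∈ l, t ∉ seen) :
    pvFresh seen l = l := by
  induction l generalizing seen with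
  | nil => rfl
  | cons t ts ih =>
    rcases List.nodup_cons.mp hnd with ⟨htts, hnd'⟩
    simp only [pvFresh, if_neg (h t (List.mem_cons_self))]
    congr 1
    exact ih (seen ++ [t]) hnd' (fun x hx => by
      simp only [List.mem_append, List.mem_singleton]
      rintro (hs | rfl)
      · exact h x (List.mem_cons_of_mem _ hx) hs
      · exact htts hx)

-- key dedup commutes with token expansion: token-level fresh = key-level fresh expanded
theorem pvKeyFresh (keys P : List String) :
    pvFresh (P.flatMap pvG) (keys.flatMap pvG) = (pvFresh P keys).flatMap pvG := by
  induction keys generalizing P with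
  | nil => simp [pvFresh]
  | cons k ks ih =>
    simp only [List.flatMap_cons]
    by_cases hk : k ∈ P
    · rw [pvFresh_skip _ _ _ (fun t ht => List.mem_flatMap.mpr ⟨k, hk, ht⟩)]
      simp only [pvFresh, if_pos hk]
      exact ih P
    · have hnew : ∀ t ∈ pvG k, t ∉ P.flatMap pvG := by
        intro t ht hmem
        rcases List.mem_flatMap.mp hmem with ⟨k', hk', ht'⟩
        exact pvG_disj k k' (fun he => hk (he ▸ hk')) t ht ht'
      rw [pvFresh_append, pvFresh_of_new _ _ (pvG_nodup k) hnew]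
      have hP : P.flatMap pvG ++ pvG k = (P ++ [k]).flatMap pvG := by
        simp
      rw [hP, ih (P ++ [k])]
      simp [pvFresh, hk]

-- ===== VERDICT (by name: the statement is the Claim_ definition above) =====
theorem industry_query_tokens_py_spec : Claim_equal_industry_query_tokens_py := by
  intro industries _
  unfold Spec_industry_query_tokens_py
  match industries with
  | none => rfl
  | some inds =>
    show pvLoopA inds [] PySem.Set.empty = _
    have hempty : (PySem.Set.empty : PySem.Set String) = ([] : List String) := rfl
    rw [hempty]
    simp only [industry_query_tokens_py_alt]
    rw [pvLoopA_spec inds [] (by simp)]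
    set keys := inds.map (fun ind => PySem.Str.lower (PySem.Str.strip (if ind == "" then "" else ind))) with hkeys
    have hflat : pvFlat inds = keys.flatMap pvG := by
      simp [pvFlat, hkeys, List.flatMap_map, pvG]
    rw [hflat]
    have h0 : pvFresh [] (keys.flatMap pvG) = (pvFresh [] keys).flatMap pvG := by
      have := pvKeyFresh keys []
      simpa using this
    rw [h0]
    have hded : PySem.List.dedup keys = pvFresh [] keys := by
      simp only [PySem.List.dedup_eq_ofList, PySem.Set.ofList_eq_foldl]
      simpa using pvFoldl_add_eq_fresh keys []
    rw [PySem.List.foldl_append_eq_flatMap, hded]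
    rfl
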